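-- pv_equiv track=rewrite | github.com/timMetzger/AdventOfCode2021 | day10.py | get_line_value
-- ===== SOURCE A (Python) =====
-- def get_line_value(chars):
--     point_table = {
--         ')': 1,
--         ']': 2,
--         '}': 3,
--         '>': 4
--     }
--     score = 0
--     for char in chars:
--         score = score * 5 + point_table[char]
--
--     return score
-- ===== SOURCE B (Python) =====
-- def get_line_value(chars):
--     point_table = {
--         ')': 1,
--         ']': 2,
--         '}': 3,
--         '>': 4
--     }
--     digits = [point_table[char] for char in chars]
--     total = 0
--     power = 1
--     for d in reversed(digits):
--         total += d * power
--         power *= 5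
--     return total
-- ===== Notes on version B (the rewrite author's own statement) =====
-- stated objective: alternative
-- what changed: Replaces the fused Horner accumulator (score = score*5 + value) by two passes: first map every character to its digit value, then sum the digits from the least-significant end while maintaining a running power of five.
import Mathlib
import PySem

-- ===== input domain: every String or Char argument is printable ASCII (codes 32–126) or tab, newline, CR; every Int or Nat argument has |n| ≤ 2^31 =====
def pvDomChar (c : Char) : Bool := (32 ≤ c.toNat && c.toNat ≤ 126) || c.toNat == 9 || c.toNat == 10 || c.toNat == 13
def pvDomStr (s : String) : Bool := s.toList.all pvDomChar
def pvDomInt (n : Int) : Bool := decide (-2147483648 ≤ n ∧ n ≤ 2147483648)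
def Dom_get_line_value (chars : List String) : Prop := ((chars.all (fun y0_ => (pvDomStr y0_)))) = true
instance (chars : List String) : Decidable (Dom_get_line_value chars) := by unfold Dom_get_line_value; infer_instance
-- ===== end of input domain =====

-- B replaces A's fused Horner accumulator by two passes (digit extraction, then a
-- reversed weighted sum with a running power of five); equal cost, different decomposition.

-- ===== PORT A =====
def pvPointTable : PySem.Dict String Int :=
  PySem.Dict.ofList [(")", 1), ("]", 2), ("}", 3), (">", 4)]

-- point_table[char]: KeyError (none) on other strings is excluded by Pre_; getD 0 is exact inside Pre_
def get_line_value (chars : List String) : Int :=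
  chars.foldl (fun score char => score * 5 + (pvPointTable.get? char).getD 0) 0

-- ===== PORT B =====
def get_line_value_alt (chars : List String) : Int :=
  let digits := chars.map (fun char => (pvPointTable.get? char).getD 0)
  (digits.reverse.foldl (fun tp d => (tp.1 + d * tp.2, tp.2 * 5)) ((0 : Int), (1 : Int))).1

-- ===== PRECONDITION & SPEC =====
-- Pre_ excludes inputs containing a string other than ")", "]", "}", ">", on which A raises KeyError.
def Pre_get_line_value (chars : List String) : Prop :=
  ∀ c ∈ chars, c = ")" ∨ c = "]" ∨ c = "}" ∨ c = ">"
instance (chars : List String) : Decidable (Pre_get_line_value chars) := by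
  unfold Pre_get_line_value; infer_instance
def pvWitness_get_line_value : List String := [")", ">", "]"]
def Spec_get_line_value (chars : List String) (out : Int) : Prop := out = get_line_value_alt chars
instance (chars : List String) (out : Int) : Decidable (Spec_get_line_value chars out) := by
  unfold Spec_get_line_value; infer_instance

-- ===== CLAIM (what is proved, stated in full; the proofs are below) =====
def Claim_equal_get_line_value : Prop := ∀ (chars : List String), Dom_get_line_value chars → Pre_get_line_value chars → Spec_get_line_value chars (get_line_value chars)

-- ===== LEMMAS AND PROOFS =====

-- the reversed accumulation, as a foldr (B's loop over digits.reverse)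
lemma pv_rev_foldl (ds : List Int) :
    ds.reverse.foldl (fun tp d => (tp.1 + d * tp.2, tp.2 * 5)) ((0 : Int), (1 : Int))
      = ds.foldr (fun d tp => (tp.1 + d * tp.2, tp.2 * 5)) ((0 : Int), (1 : Int)) := by
  rw [List.foldl_reverse]

lemma pv_snd_pow {α : Type} (f : α → Int) (l : List α) :
    (l.foldr (fun x tp => (tp.1 + f x * tp.2, tp.2 * 5)) ((0 : Int), (1 : Int))).2
      = (5 : Int) ^ l.length := by
  induction l with
  | nil => simp
  | cons x l ih => simp [List.foldr, ih, pow_succ]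

lemma pv_horner {α : Type} (f : α → Int) (l : List α) (s : Int) :
    l.foldl (fun a x => a * 5 + f x) s
      = s * (5 : Int) ^ l.length
        + (l.foldr (fun x tp => (tp.1 + f x * tp.2, tp.2 * 5)) ((0 : Int), (1 : Int))).1 := by
  induction l generalizing s with
  | nil => simp
  | cons x l ih =>
      simp only [List.foldl, List.foldr, List.length_cons]
      rw [ih, pv_snd_pow]
      ring

-- ===== VERDICT (by name: the statement is the Claim_ definition above) =====
theorem get_line_value_spec : Claim_equal_get_line_value := by
  intro chars _ _
  show get_line_value chars = get_line_value_alt chars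
  unfold get_line_value get_line_value_alt
  simp only [pv_rev_foldl, List.foldr_map, pv_horner]
  simp
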